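-- pv_equiv track=rewrite | github.com/romirG/aadhar-kavach | ml_backend/explainability/deviation_analyzer.py | _determine_deviation_type
-- ===== SOURCE A (Python) =====
-- from typing import Dict, List, Optional, Any, Tuple
--
-- def _determine_deviation_type(feature: str, sample: Dict[str, Any]) -> str:
--     """Determine the type of deviation based on feature name and context."""
--     feature_lower = feature.lower()
--
--     if any(x in feature_lower for x in ['state', 'district', 'pincode', 'geo']):
--         return 'geographic'
--     elif any(x in feature_lower for x in ['month', 'day', 'weekend', 'quarter', 'time']):
--         return 'temporal'
--     elif any(x in feature_lower for x in ['operator', 'center', 'update', 'enrolment']):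
--         return 'behavioral'
--     else:
--         return 'statistical'
-- ===== SOURCE B (Python) =====
-- from typing import Dict, Any
--
-- # keyword -> category lookup table; categories resolved by fixed priority afterwards
-- _KEYWORD_CATEGORY = {
--     'state': 'geographic', 'district': 'geographic', 'pincode': 'geographic', 'geo': 'geographic',
--     'month': 'temporal', 'day': 'temporal', 'weekend': 'temporal', 'quarter': 'temporal', 'time': 'temporal',
--     'operator': 'behavioral', 'center': 'behavioral', 'update': 'behavioral', 'enrolment': 'behavioral',
-- }
-- _LENGTHS = (3, 4, 5, 6, 7, 8, 9)
-- _PRIORITY = ('geographic', 'temporal', 'behavioral')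
--
--
-- def _determine_deviation_type(feature: str, sample: Dict[str, Any]) -> str:
--     """Single sliding-window scan: hash every substring of keyword length once,
--     collect the matched categories, then resolve by priority order."""
--     fl = feature.lower()
--     found = set()
--     for i in range(len(fl)):
--         for L in _LENGTHS:
--             cat = _KEYWORD_CATEGORY.get(fl[i:i + L])
--             if cat is not None:
--                 found.add(cat)
--     for cat in _PRIORITY:
--         if cat in found:
--             return cat
--     return 'statistical'
-- ===== Notes on version B (the rewrite author's own statement) =====
-- stated objective: alternative
-- what changed: Instead of testing each keyword for containment, B slides one window over the lowercased feature, hashes every substring of keyword length in a keyword->category dict, collects matched categories in a set, and resolves by fixed priority order.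
import Mathlib
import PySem

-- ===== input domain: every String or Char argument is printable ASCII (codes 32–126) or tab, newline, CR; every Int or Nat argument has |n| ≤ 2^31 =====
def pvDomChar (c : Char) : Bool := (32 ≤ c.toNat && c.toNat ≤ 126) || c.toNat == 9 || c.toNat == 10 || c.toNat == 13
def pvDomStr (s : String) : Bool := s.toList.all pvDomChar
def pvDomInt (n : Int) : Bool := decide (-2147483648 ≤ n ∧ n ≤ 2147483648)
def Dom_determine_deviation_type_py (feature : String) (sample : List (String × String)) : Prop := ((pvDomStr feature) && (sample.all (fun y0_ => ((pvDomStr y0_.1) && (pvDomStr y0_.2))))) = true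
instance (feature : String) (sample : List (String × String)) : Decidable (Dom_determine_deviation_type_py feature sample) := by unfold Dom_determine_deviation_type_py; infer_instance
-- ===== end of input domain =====

-- B replaces per-keyword containment tests by one sliding-window substring scan into a keyword->category dict plus a priority pass; equal results, sample unused.


-- ===== PORT A =====
def determine_deviation_type_py (feature : String) (_sample : List (String × String)) : String :=
  let feature_lower := PySem.Str.lower feature
  if ["state", "district", "pincode", "geo"].any (fun x => PySem.Str.isIn x feature_lower) then
    "geographic"
  else if ["month", "day", "weekend", "quarter", "time"].any (fun x => PySem.Str.isIn x feature_lower) then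
    "temporal"
  else if ["operator", "center", "update", "enrolment"].any (fun x => PySem.Str.isIn x feature_lower) then
    "behavioral"
  else
    "statistical"

-- ===== PORT B =====
def pvKW : PySem.Dict String String := PySem.Dict.mk
  [("state", "geographic"), ("district", "geographic"), ("pincode", "geographic"), ("geo", "geographic"),
   ("month", "temporal"), ("day", "temporal"), ("weekend", "temporal"), ("quarter", "temporal"), ("time", "temporal"),
   ("operator", "behavioral"), ("center", "behavioral"), ("update", "behavioral"), ("enrolment", "behavioral")]

def pvLens : List Int := [3, 4, 5, 6, 7, 8, 9]

def pvScan (fl : String) : PySem.Set String :=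
  (PySem.List.pyRange 0 (fl.toList.length : Int) 1).foldl (fun acc i =>
    pvLens.foldl (fun acc2 L =>
      match pvKW.get? (PySem.Str.slice fl (some i) (some (i + L))) with
      | some cat => PySem.Set.add acc2 cat
      | none => acc2) acc) PySem.Set.empty

def pvPick (found : PySem.Set String) : List String → String
  | [] => "statistical"
  | c :: rest => if PySem.Set.contains found c then c else pvPick found rest

def determine_deviation_type_py_alt (feature : String) (_sample : List (String × String)) : String :=
  pvPick (pvScan (PySem.Str.lower feature)) ["geographic", "temporal", "behavioral"]

-- ===== PRECONDITION & SPEC =====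
def Spec_determine_deviation_type_py (feature : String) (sample : List (String × String)) (out : String) : Prop := out = determine_deviation_type_py_alt feature sample
instance (feature : String) (sample : List (String × String)) (out : String) : Decidable (Spec_determine_deviation_type_py feature sample out) := by unfold Spec_determine_deviation_type_py; infer_instance

-- ===== CLAIM (what is proved, stated in full; the proofs are below) =====
def Claim_equal_determine_deviation_type_py : Prop := ∀ (feature : String) (sample : List (String × String)), Dom_determine_deviation_type_py feature sample → Spec_determine_deviation_type_py feature sample (determine_deviation_type_py feature sample)

-- ===== LEMMAS AND PROOFS =====

theorem pvLens_pos : ∀ L ∈ pvLens, 0 < L := by decide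

theorem pv_mem_inner (fl : String) (i : Int) (acc : PySem.Set String) (ls : List Int) (x : String) :
    x ∈ ls.foldl (fun acc2 L =>
      match pvKW.get? (PySem.Str.slice fl (some i) (some (i + L))) with
      | some cat => PySem.Set.add acc2 cat
      | none => acc2) acc
    ↔ x ∈ acc ∨ ∃ L ∈ ls, pvKW.get? (PySem.Str.slice fl (some i) (some (i + L))) = some x := by
  induction ls generalizing acc with
  | nil => simp
  | cons L rest ih =>
    simp only [List.foldl_cons]
    cases h : pvKW.get? (PySem.Str.slice fl (some i) (some (i + L))) with
    | none => rw [ih]; simp [h]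
    | some cat => rw [ih]; simp [PySem.Set.mem_add, h]; tauto

theorem pv_mem_outer (fl : String) (is : List Int) (acc : PySem.Set String) (x : String) :
    x ∈ is.foldl (fun acc i =>
      pvLens.foldl (fun acc2 L =>
        match pvKW.get? (PySem.Str.slice fl (some i) (some (i + L))) with
        | some cat => PySem.Set.add acc2 cat
        | none => acc2) acc) acc
    ↔ x ∈ acc ∨ ∃ i ∈ is, ∃ L ∈ pvLens, pvKW.get? (PySem.Str.slice fl (some i) (some (i + L))) = some x := by
  induction is generalizing acc with
  | nil => simp
  | cons j rest ih =>
    simp only [List.foldl_cons]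
    rw [ih, pv_mem_inner]
    simp only [List.mem_cons]
    constructor
    · rintro ((h | h) | h)
      · exact Or.inl h
      · exact Or.inr ⟨j, Or.inl rfl, h⟩
      · obtain ⟨i, hi, h⟩ := h
        exact Or.inr ⟨i, Or.inr hi, h⟩
    · rintro (h | ⟨i, (rfl | hi), h⟩)
      · exact Or.inl (Or.inl h)
      · exact Or.inl (Or.inr h)
      · exact Or.inr ⟨i, hi, h⟩

theorem pv_mem_scan (fl : String) (x : String) :
    x ∈ pvScan fl ↔ ∃ i ∈ PySem.List.pyRange 0 (fl.toList.length : Int) 1, ∃ L ∈ pvLens,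
      pvKW.get? (PySem.Str.slice fl (some i) (some (i + L))) = some x := by
  unfold pvScan
  rw [pv_mem_outer]
  simp [PySem.Set.empty]

theorem pv_hit_iff (fl k : String) (hk : k.toList ≠ []) (hL : ((k.toList.length : Int)) ∈ pvLens) :
    (∃ i ∈ PySem.List.pyRange 0 (fl.toList.length : Int) 1, ∃ L ∈ pvLens,
        PySem.Str.slice fl (some i) (some (i + L)) = k)
    ↔ PySem.Str.isIn k fl = true := by
  rw [PySem.Str.isIn_eq, ← PySem.Chars.exists_prefix_drop_iff_isIn]
  constructor
  · rintro ⟨i, hi, L, hLm, hs⟩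
    rw [PySem.List.mem_pyRange_one] at hi
    have h0L : 0 ≤ L := le_of_lt (pvLens_pos L hLm)
    have h0i : 0 ≤ i := hi.1
    have := congrArg String.toList hs
    rw [PySem.Str.toList_slice, PySem.Chars.slice_eq_listSlice,
        PySem.List.slice_toNat fl.toList h0i (by omega)] at this
    exact ⟨i.toNat, this ▸ List.take_prefix _ _⟩
  · rintro ⟨j, hpre⟩
    obtain ⟨t, ht⟩ := hpre
    have hjlt : j < fl.toList.length := by
      by_contra hge
      have : List.drop j fl.toList = [] := List.drop_eq_nil_of_le (by omega)
      rw [this] at ht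
      exact hk (List.append_eq_nil_iff.mp ht).1
    refine ⟨(j : Int), ?_, (k.toList.length : Int), hL, ?_⟩
    · rw [PySem.List.mem_pyRange_one]
      constructor
      · exact Int.natCast_nonneg j
      · exact_mod_cast hjlt
    · apply String.toList_inj.mp
      rw [PySem.Str.toList_slice, PySem.Chars.slice_eq_listSlice]
      have hcast : ((j : Int) + (k.toList.length : Int)) = (((j + k.toList.length : Nat)) : Int) := by push_cast; ring
      rw [hcast, PySem.List.slice_natCast]
      rw [← ht, Nat.add_sub_cancel_left, List.take_left]

theorem pv_get?_none (l : List (String × String)) (s : String) (h : ∀ p ∈ l, p.1 ≠ s) :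
    (PySem.Dict.mk l).get? s = none := by
  induction l with
  | nil => simp [PySem.Dict.get?]
  | cons p rest ih =>
    rw [PySem.Dict.get?_mk_cons, if_neg]
    · exact ih fun q hq => h q (List.mem_cons_of_mem _ hq)
    · simp only [beq_iff_eq]
      exact h p (List.mem_cons_self ..)

theorem pv_kw_geo (s : String) : pvKW.get? s = some "geographic" ↔ s ∈ (["state", "district", "pincode", "geo"] : List String) := by
  by_cases h1 : s = "state"
  · subst h1; decide
  by_cases h2 : s = "district"
  · subst h2; decide
  by_cases h3 : s = "pincode"
  · subst h3; decide
  by_cases h4 : s = "geo"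
  · subst h4; decide
  by_cases h5 : s = "month"
  · subst h5; decide
  by_cases h6 : s = "day"
  · subst h6; decide
  by_cases h7 : s = "weekend"
  · subst h7; decide
  by_cases h8 : s = "quarter"
  · subst h8; decide
  by_cases h9 : s = "time"
  · subst h9; decide
  by_cases h10 : s = "operator"
  · subst h10; decide
  by_cases h11 : s = "center"
  · subst h11; decide
  by_cases h12 : s = "update"
  · subst h12; decide
  by_cases h13 : s = "enrolment"
  · subst h13; decide
  rw [pv_get?_none _ s (by
    intro p hp
    simp only [pvKW] at hp
    fin_cases hp <;> simpa using fun he => by simp_all)]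
  simp [h1, h2, h3, h4]

theorem pv_kw_temp (s : String) : pvKW.get? s = some "temporal" ↔ s ∈ (["month", "day", "weekend", "quarter", "time"] : List String) := by
  by_cases h1 : s = "state"
  · subst h1; decide
  by_cases h2 : s = "district"
  · subst h2; decide
  by_cases h3 : s = "pincode"
  · subst h3; decide
  by_cases h4 : s = "geo"
  · subst h4; decide
  by_cases h5 : s = "month"
  · subst h5; decide
  by_cases h6 : s = "day"
  · subst h6; decide
  by_cases h7 : s = "weekend"
  · subst h7; decide
  by_cases h8 : s = "quarter"
  · subst h8; decide
  by_cases h9 : s = "time"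
  · subst h9; decide
  by_cases h10 : s = "operator"
  · subst h10; decide
  by_cases h11 : s = "center"
  · subst h11; decide
  by_cases h12 : s = "update"
  · subst h12; decide
  by_cases h13 : s = "enrolment"
  · subst h13; decide
  rw [pv_get?_none _ s (by
    intro p hp
    simp only [pvKW] at hp
    fin_cases hp <;> simpa using fun he => by simp_all)]
  simp [h5, h6, h7, h8, h9]

theorem pv_kw_beh (s : String) : pvKW.get? s = some "behavioral" ↔ s ∈ (["operator", "center", "update", "enrolment"] : List String) := by
  by_cases h1 : s = "state"
  · subst h1; decide
  by_cases h2 : s = "district"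
  · subst h2; decide
  by_cases h3 : s = "pincode"
  · subst h3; decide
  by_cases h4 : s = "geo"
  · subst h4; decide
  by_cases h5 : s = "month"
  · subst h5; decide
  by_cases h6 : s = "day"
  · subst h6; decide
  by_cases h7 : s = "weekend"
  · subst h7; decide
  by_cases h8 : s = "quarter"
  · subst h8; decide
  by_cases h9 : s = "time"
  · subst h9; decide
  by_cases h10 : s = "operator"
  · subst h10; decide
  by_cases h11 : s = "center"
  · subst h11; decide
  by_cases h12 : s = "update"
  · subst h12; decide
  by_cases h13 : s = "enrolment"
  · subst h13; decide
  rw [pv_get?_none _ s (by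
    intro p hp
    simp only [pvKW] at hp
    fin_cases hp <;> simpa using fun he => by simp_all)]
  simp [h10, h11, h12, h13]

theorem pv_scan_cat (fl cat : String) (group : List String)
    (hG : ∀ s, pvKW.get? s = some cat ↔ s ∈ group)
    (hne : ∀ k ∈ group, k.toList ≠ [] ∧ ((k.toList.length : Int)) ∈ pvLens) :
    PySem.Set.contains (pvScan fl) cat = (group.any (fun x => PySem.Str.isIn x fl)) := by
  rcases h : group.any (fun x => PySem.Str.isIn x fl) with _ | _
  · rw [Bool.eq_false_iff]
    intro hc
    rw [PySem.Set.contains_iff, pv_mem_scan] at hc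
    obtain ⟨i, hi, L, hLm, hget⟩ := hc
    rw [hG] at hget
    have hhit : PySem.Str.isIn (PySem.Str.slice fl (some i) (some (i + L))) fl = true := by
      rw [← pv_hit_iff fl _ (hne _ hget).1 (hne _ hget).2]
      exact ⟨i, hi, L, hLm, rfl⟩
    rw [List.any_eq_false] at h
    exact absurd hhit (by simpa using h _ hget)
  · rw [List.any_eq_true] at h
    obtain ⟨k, hkmem, hkin⟩ := h
    rw [PySem.Set.contains_iff, pv_mem_scan]
    obtain ⟨i, hi, L, hLm, hs⟩ := (pv_hit_iff fl k (hne _ hkmem).1 (hne _ hkmem).2).mpr (by simpa using hkin)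
    exact ⟨i, hi, L, hLm, by rw [hs, hG]; exact hkmem⟩

-- ===== VERDICT (by name: the statement is the Claim_ definition above) =====
theorem determine_deviation_type_py_spec : Claim_equal_determine_deviation_type_py := by
  intro feature sample _
  unfold Spec_determine_deviation_type_py determine_deviation_type_py determine_deviation_type_py_alt
  simp only [pvPick]
  rw [pv_scan_cat _ _ _ pv_kw_geo (by decide),
      pv_scan_cat _ _ _ pv_kw_temp (by decide),
      pv_scan_cat _ _ _ pv_kw_beh (by decide)]
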